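-- pv_equiv track=rewrite | github.com/ctf-club/ctf-utils | crypto.py | crack_repeated_xor
-- ===== SOURCE A (Python) =====
-- def split(text, keylen):
--     """Splits the text into keylen different strings, where the ith
--     character of the text is placed into the `i % keylen` returned string.
--     """
--     results = [""] * keylen
--     for i in range(0, len(text)):
--         results[i % keylen] += text[i]
--
--     return results
--
-- def crack_repeated_xor(ciphertext, keylen, non_printable_chars=[10]):
--     """Given a ciphertext and a key length, returns a list of lists where each
--     inner list contains all possible bytes that could have been XORed with the
--     corresponding byte of the plaintext to get the given ciphertext, assuming
--     the plaintext only consists of printable ascii characters and excluding the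
--     characters given in non_printable_chars.
--     """
--     possible_keys = []
--     split_strs = split(ciphertext, keylen)
--     for i in range(0, len(split_strs)):
--         possible_keys.append([])
--         s = split_strs[i]
--
--         for key in range(0, 256):
--             # XOR the current byte with all the bytes in the string
--             res = ""
--             for c in s:
--                 res += str(chr(ord(c) ^ key))
--
--             # Check if all characters are valid ascii
--             good = True
--             for c in res:
--                 if not (ord(c) in non_printable_chars or
--                         (ord(c) >= 32 and ord(c) < 127)):
--                     good = False
--                     break
--
--             if good:
--                 possible_keys[i].append(key)
--
--     return possible_keys
-- ===== SOURCE B (Python) =====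
-- def crack_repeated_xor(ciphertext, keylen, non_printable_chars=[10]):
--     # One pass buckets the distinct byte values of each column into a set; each
--     # candidate key is then tested against the distinct bytes only, with the
--     # allowed-character test done against a precomputed set.
--     allowed = set(non_printable_chars)
--     cols = [set() for _ in range(keylen)]
--     for i, ch in enumerate(ciphertext):
--         cols[i % keylen].add(ord(ch))
--     result = []
--     for col in cols:
--         keys = list(range(256))
--         for b in col:
--             keys = [k for k in keys if (b ^ k) in allowed or 32 <= (b ^ k) < 127]
--         result.append(keys)
--     return result
-- ===== Notes on version B (the rewrite author's own statement) =====
-- stated objective: faster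
-- what changed: B buckets each column's distinct byte values into a set in one pass over the ciphertext and tests each of the 256 candidate keys against only those distinct bytes, with the allowed-character test against a precomputed membership set, instead of re-building the XORed column string and rescanning the whole column (with a list-membership scan per character) for every key.
import Mathlib
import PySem

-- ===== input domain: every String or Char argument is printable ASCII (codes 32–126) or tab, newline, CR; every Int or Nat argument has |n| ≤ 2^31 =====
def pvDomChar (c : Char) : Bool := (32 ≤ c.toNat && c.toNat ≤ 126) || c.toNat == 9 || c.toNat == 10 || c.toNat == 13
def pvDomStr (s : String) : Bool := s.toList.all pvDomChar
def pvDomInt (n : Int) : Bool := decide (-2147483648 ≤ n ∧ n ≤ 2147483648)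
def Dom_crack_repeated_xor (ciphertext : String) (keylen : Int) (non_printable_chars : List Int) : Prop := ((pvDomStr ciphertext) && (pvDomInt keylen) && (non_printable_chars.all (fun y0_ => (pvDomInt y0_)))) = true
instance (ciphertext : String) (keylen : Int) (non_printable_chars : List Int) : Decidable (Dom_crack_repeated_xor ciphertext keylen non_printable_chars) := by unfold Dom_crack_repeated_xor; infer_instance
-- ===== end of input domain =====

-- B buckets each column's DISTINCT byte values once and filters the 256 candidate keys
-- through those distinct bytes with a set-based allowed-character test, instead of
-- re-XORing and rescanning the whole column for every key (objective: faster).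


-- ===== PORT A =====
-- split(text, keylen): results = [""]*keylen; results[i % keylen] += text[i]
def pvSplit (text : List Char) (keylen : Int) : List (List Char) :=
  (PySem.List.enumerate text).foldl
    (fun rs ic => rs.modify (PySem.Int.mod ic.1 keylen).toNat (fun s => s ++ [ic.2]))
    (List.replicate keylen.toNat [])

-- the inner good-loop with its break: stops at the first bad character
def pvGoodLoop (npc : List Int) : List Char → Bool
  | [] => true
  | c :: rest =>
      if npc.contains ((c.toNat : Int)) || (32 ≤ (c.toNat : Int) && (c.toNat : Int) < 127)
      then pvGoodLoop npc rest else false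

def crack_repeated_xor (ciphertext : String) (keylen : Int) (non_printable_chars : List Int) : List (List Int) :=
  let split_strs := pvSplit ciphertext.toList keylen
  split_strs.foldl
    (fun acc s =>
      let keys := (PySem.List.pyRange 0 256 1).foldl
        (fun ks key =>
          let res := s.foldl (fun r c => r ++ [Char.ofNat (PySem.Int.bxor (c.toNat : Int) key).toNat]) ([] : List Char)
          if pvGoodLoop non_printable_chars res then ks ++ [key] else ks)
        ([] : List Int)
      acc ++ [keys])
    []

-- ===== PORT B =====
def pvOk (allowed : PySem.Set Int) (v : Int) : Bool := allowed.contains v || (32 ≤ v && v < 127)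

-- cols = [set() for _ in range(keylen)]; cols[i % keylen].add(ord(ch))
def pvCols (text : List Char) (keylen : Int) : List (PySem.Set Int) :=
  (PySem.List.enumerate text).foldl
    (fun cs ic => cs.modify (PySem.Int.mod ic.1 keylen).toNat (fun s => PySem.Set.add s ((ic.2.toNat : Int))))
    (List.replicate keylen.toNat (PySem.Set.ofList []))

def crack_repeated_xor_alt (ciphertext : String) (keylen : Int) (non_printable_chars : List Int) : List (List Int) :=
  let allowed := PySem.Set.ofList non_printable_chars
  let cols := pvCols ciphertext.toList keylen
  cols.foldl
    (fun acc col =>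
      let keys := col.foldl
        (fun keys b => keys.filter (fun k => pvOk allowed (PySem.Int.bxor b k)))
        (PySem.List.pyRange 0 256 1)
      acc ++ [keys])
    []

-- ===== PRECONDITION & SPEC =====
-- Pre_ excludes exactly the inputs where Python A raises: a nonempty ciphertext with
-- keylen ≤ 0 (ZeroDivisionError for keylen = 0, IndexError for keylen < 0).
def Pre_crack_repeated_xor (ciphertext : String) (keylen : Int) (non_printable_chars : List Int) : Prop :=
  0 < keylen ∨ ciphertext = ""
instance (ciphertext : String) (keylen : Int) (non_printable_chars : List Int) : Decidable (Pre_crack_repeated_xor ciphertext keylen non_printable_chars) := by unfold Pre_crack_repeated_xor; infer_instance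

def pvWitness_crack_repeated_xor : String × Int × List Int := ("AZ!", 2, [10])

def Spec_crack_repeated_xor (ciphertext : String) (keylen : Int) (non_printable_chars : List Int) (out : List (List Int)) : Prop := out = crack_repeated_xor_alt ciphertext keylen non_printable_chars
instance (ciphertext : String) (keylen : Int) (non_printable_chars : List Int) (out : List (List Int)) : Decidable (Spec_crack_repeated_xor ciphertext keylen non_printable_chars out) := by unfold Spec_crack_repeated_xor; infer_instance

-- ===== CLAIM (what is proved, stated in full; the proofs are below) =====
def Claim_equal_crack_repeated_xor : Prop := ∀ (ciphertext : String) (keylen : Int) (non_printable_chars : List Int), Dom_crack_repeated_xor ciphertext keylen non_printable_chars → Pre_crack_repeated_xor ciphertext keylen non_printable_chars → Spec_crack_repeated_xor ciphertext keylen non_printable_chars (crack_repeated_xor ciphertext keylen non_printable_chars)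

-- ===== LEMMAS AND PROOFS =====

-- modify commutes with map when the modification does
theorem pv_map_modify {α β : Type} (g : α → β) (f : α → α) (f' : β → β)
    (h : ∀ a, g (f a) = f' (g a)) :
    ∀ (l : List α) (i : Nat), (l.modify i f).map g = (l.map g).modify i f' := by
  intro l
  induction l with
  | nil => intro i; cases i <;> rfl
  | cons x xs ih =>
      intro i
      cases i with
      | zero =>
          show (f x :: xs).map g = f' (g x) :: xs.map g
          simp [h]
      | succ n =>
          show (x :: xs.modify n f).map g = g x :: (xs.map g).modify n f'
          simp [ih n]

-- pvCols is the image of pvSplit under "set of byte values"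
theorem pv_cols_eq_split (text : List Char) (keylen : Int) :
    pvCols text keylen
      = (pvSplit text keylen).map
          (fun s => PySem.Set.ofList (s.map (fun c => (c.toNat : Int)))) := by
  unfold pvCols pvSplit
  have main : ∀ (l : List (Int × Char)) (rs : List (List Char)),
      l.foldl (fun cs ic => cs.modify (PySem.Int.mod ic.1 keylen).toNat
                  (fun s => PySem.Set.add s ((ic.2.toNat : Int))))
          (rs.map (fun s => PySem.Set.ofList (s.map (fun c => (c.toNat : Int)))))
      = (l.foldl (fun rs ic => rs.modify (PySem.Int.mod ic.1 keylen).toNat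
                    (fun s => s ++ [ic.2])) rs).map
          (fun s => PySem.Set.ofList (s.map (fun c => (c.toNat : Int)))) := by
    intro l
    induction l with
    | nil => intro rs; simp
    | cons p l ih =>
        intro rs
        simp only [List.foldl_cons]
        rw [← pv_map_modify (fun s => PySem.Set.ofList (s.map (fun c => (c.toNat : Int))))
              (fun s => s ++ [p.2]) (fun s => PySem.Set.add s ((p.2.toNat : Int)))
              (by
                intro a
                simp [PySem.Set.ofList_eq_foldl, List.foldl_append])]
        exact ih _
  rw [← main]
  congr 1
  simp [List.map_replicate]

-- every byte of a split bucket comes from the text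
theorem pv_mem_modify {α : Type} (f : α → α) :
    ∀ (l : List α) (i : Nat) (a : α), a ∈ l.modify i f → a ∈ l ∨ ∃ b ∈ l, a = f b := by
  intro l
  induction l with
  | nil => intro i a h; cases i <;> simp_all [List.modify]
  | cons x xs ih =>
      intro i a h
      cases i with
      | zero =>
          have h' : a ∈ f x :: xs := h
          rcases List.mem_cons.mp h' with h'' | h''
          · exact Or.inr ⟨x, by simp, h''⟩
          · exact Or.inl (by simp [h''])
      | succ n =>
          have h' : a ∈ x :: xs.modify n f := h
          rcases List.mem_cons.mp h' with h'' | h''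
          · exact Or.inl (by simp [h''])
          · rcases ih n a h'' with h3 | ⟨b, hb, rfl⟩
            · exact Or.inl (by simp [h3])
            · exact Or.inr ⟨b, by simp [hb], rfl⟩

theorem pv_split_chars (text : List Char) (keylen : Int) :
    ∀ s ∈ pvSplit text keylen, ∀ c ∈ s, c ∈ text := by
  unfold pvSplit
  have main : ∀ (l : List (Int × Char)) (rs : List (List Char)) (P : Char → Prop),
      (∀ s ∈ rs, ∀ c ∈ s, P c) → (∀ p ∈ l, P p.2) →
      ∀ s ∈ l.foldl (fun rs ic => rs.modify (PySem.Int.mod ic.1 keylen).toNat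
                        (fun s => s ++ [ic.2])) rs, ∀ c ∈ s, P c := by
    intro l
    induction l with
    | nil => intro rs P hrs _ s hs; exact hrs s hs
    | cons p l ih =>
        intro rs P hrs hl s hs
        refine ih _ P ?_ (fun q hq => hl q (by simp [hq])) s hs
        intro t ht c hc
        rcases pv_mem_modify _ rs _ _ ht with h | ⟨b, hb, rfl⟩
        · exact hrs t h c hc
        · rcases List.mem_append.mp hc with h | h
          · exact hrs b hb c h
          · simp at h; subst h; exact hl p (by simp)
  intro s hs c hc
  have := main (PySem.List.enumerate text) _ (fun c => c ∈ text) (by simp) ?_ s hs c hc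
  · exact this
  · intro p hp
    rcases (PySem.List.mem_enumerate_iff text 0 p).mp hp with ⟨k, hk, rfl⟩
    exact List.getElem_mem hk

-- the good-loop is List.all
theorem pv_goodLoop_eq_all (npc : List Int) (l : List Char) :
    pvGoodLoop npc l
      = l.all (fun c => npc.contains ((c.toNat : Int)) || (32 ≤ (c.toNat : Int) && (c.toNat : Int) < 127)) := by
  induction l with
  | nil => rfl
  | cons c rest ih =>
      simp only [pvGoodLoop, List.all_cons]
      split <;> simp_all

-- valid codepoint round trip
theorem pv_char_roundtrip (v : Nat) (h : v < 256) : (Char.ofNat v).toNat = v := by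
  have hv : v.isValidChar := Or.inl (by omega)
  rw [Char.ofNat, dif_pos hv]
  rfl

-- repeated filtering is filtering by the conjunction
theorem pv_foldl_filter {α β : Type} (pb : β → α → Bool) :
    ∀ (col : List β) (init : List α),
      col.foldl (fun keys b => keys.filter (pb b)) init
        = init.filter (fun k => col.all (fun b => pb b k)) := by
  intro col
  induction col with
  | nil => intro init; simp
  | cons b col ih =>
      intro init
      simp only [List.foldl_cons, ih, List.filter_filter, List.all_cons]
      apply List.filter_congr
      intro x _
      simp [Bool.and_comm]

-- all agrees when the predicates agree on members
theorem pv_all_congr_mem {α : Type} (l : List α) (p q : α → Bool)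
    (h : ∀ x ∈ l, p x = q x) : l.all p = l.all q := by
  induction l with
  | nil => rfl
  | cons x xs ih =>
      simp only [List.all_cons, h x (by simp)]
      rw [ih (fun y hy => h y (by simp [hy]))]

-- per-column agreement, for columns made of domain characters
theorem pv_col_eq (npc : List Int) (s : List Char) (hs : ∀ c ∈ s, c.toNat < 128) :
    (PySem.List.pyRange 0 256 1).foldl
      (fun ks key =>
        if pvGoodLoop npc (s.foldl (fun r c => r ++ [Char.ofNat (PySem.Int.bxor (c.toNat : Int) key).toNat]) ([] : List Char))
        then ks ++ [key] else ks)
      ([] : List Int)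
    = (PySem.Set.ofList (s.map (fun c => (c.toNat : Int)))).foldl
        (fun keys b => keys.filter (fun k => pvOk (PySem.Set.ofList npc) (PySem.Int.bxor b k)))
        (PySem.List.pyRange 0 256 1) := by
  rw [pv_foldl_filter]
  rw [PySem.List.foldl_append_if_eq_filter
        (fun key => pvGoodLoop npc
          (s.foldl (fun r c => r ++ [Char.ofNat (PySem.Int.bxor (c.toNat : Int) key).toNat]) ([] : List Char)))]
  simp only [List.nil_append]
  apply List.filter_congr
  intro key hkey
  have hk := PySem.List.mem_pyRange_one.mp hkey
  -- both sides are an `all` over the byte values of s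
  rw [PySem.List.foldl_append_singleton_eq_map, List.nil_append,
      pv_goodLoop_eq_all, List.all_map]
  have hall : ∀ (p : Int → Bool),
      (PySem.Set.ofList (s.map (fun c => (c.toNat : Int)))).all p
        = (s.map (fun c => (c.toNat : Int))).all p := by
    intro p
    cases h : (s.map (fun c => (c.toNat : Int))).all p with
    | false =>
        rw [List.all_eq_false] at h
        rcases h with ⟨x, hx, hpx⟩
        exact List.all_eq_false.mpr ⟨x, (PySem.Set.mem_ofList _ _).mpr hx, hpx⟩
    | true =>
        rw [List.all_eq_true] at h
        exact List.all_eq_true.mpr (fun x hx => h x ((PySem.Set.mem_ofList _ _).mp hx))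
  rw [hall, List.all_map]
  apply pv_all_congr_mem
  intro c hc
  simp only [Function.comp_apply]
  -- the character built by A has the byte value B tests
  have hc128 := hs c hc
  have hkeyNat : key = ((key.toNat : Nat) : Int) := by omega
  have hxor : PySem.Int.bxor ((c.toNat : Int)) key = (((c.toNat ^^^ key.toNat : Nat)) : Int) := by
    conv_lhs => rw [hkeyNat]
    rw [PySem.Int.bxor_natCast]
  have hlt : c.toNat ^^^ key.toNat < 256 := by
    have h1 : c.toNat < 2 ^ 8 := by omega
    have h2 : key.toNat < 2 ^ 8 := by omega
    exact Nat.xor_lt_two_pow h1 h2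
  rw [hxor]
  simp [Int.toNat_natCast, pv_char_roundtrip _ hlt, pvOk]

-- characters of a domain string are < 128
theorem pv_dom_chars (ciphertext : String) (h : pvDomStr ciphertext = true) :
    ∀ c ∈ ciphertext.toList, c.toNat < 128 := by
  intro c hc
  have := List.all_eq_true.mp h c hc
  simp [pvDomChar] at this
  omega

-- ===== VERDICT (by name: the statement is the Claim_ definition above) =====
theorem crack_repeated_xor_spec : Claim_equal_crack_repeated_xor := by
  intro ciphertext keylen npc hdom _
  have hdomS : pvDomStr ciphertext = true := by
    unfold Dom_crack_repeated_xor at hdom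
    simp at hdom
    exact hdom.1.1
  unfold Spec_crack_repeated_xor
  simp only [crack_repeated_xor, crack_repeated_xor_alt]
  rw [pv_cols_eq_split, List.foldl_map]
  rw [PySem.List.foldl_append_singleton_eq_map, PySem.List.foldl_append_singleton_eq_map]
  simp only [List.nil_append]
  apply List.map_congr_left
  intro s hs
  exact pv_col_eq npc s
    (fun c hc => pv_dom_chars ciphertext hdomS c (pv_split_chars ciphertext.toList keylen s hs c hc))
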